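-- pv_equiv track=rewrite | github.com/Rakishiii/production-scheduler | production-scheduler/backend/app.py | completed_processes_from_progress
-- ===== SOURCE A (Python) =====
-- PROCESS_FLOW = [
--     {"name": "CNC Cutting", "ratio": 15},
--     {"name": "CNC Edging", "ratio": 15},
--     {"name": "CNC Routing", "ratio": 15},
--     {"name": "Assembly", "ratio": 40},
--     {"name": "Quality Assurance", "ratio": 5},
--     {"name": "Packing", "ratio": 10},
-- ]
--
-- def completed_processes_from_progress(progress):
--     """Derive completed process list from a numeric progress value."""
--     numeric = max(0, min(100, int(round(float(progress or 0)))))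
--     completed = []
--     cumulative = 0
--     for process in PROCESS_FLOW:
--         cumulative += process["ratio"]
--         if numeric >= cumulative:
--             completed.append(process["name"])
--         else:
--             break
--     return completed
-- ===== SOURCE B (Python) =====
-- THRESHOLDS = [15, 30, 45, 85, 90, 100]
-- NAMES = ["CNC Cutting", "CNC Edging", "CNC Routing", "Assembly",
--          "Quality Assurance", "Packing"]
--
-- def completed_processes_from_progress(progress):
--     numeric = max(0, min(100, int(round(float(progress or 0)))))
--     # binary search: count of thresholds <= numeric (bisect_right by hand)
--     lo, hi = 0, len(THRESHOLDS)
--     while lo < hi: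
--         mid = (lo + hi) // 2
--         if THRESHOLDS[mid] <= numeric:
--             lo = mid + 1
--         else:
--             hi = mid
--     return NAMES[:lo]
-- ===== Notes on version B (the rewrite author's own statement) =====
-- stated objective: alternative
-- what changed: Replaces the running-cumulative loop with break by a precomputed threshold table and a hand-written binary search (bisect_right) whose count selects a prefix of the name list.
import Mathlib
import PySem

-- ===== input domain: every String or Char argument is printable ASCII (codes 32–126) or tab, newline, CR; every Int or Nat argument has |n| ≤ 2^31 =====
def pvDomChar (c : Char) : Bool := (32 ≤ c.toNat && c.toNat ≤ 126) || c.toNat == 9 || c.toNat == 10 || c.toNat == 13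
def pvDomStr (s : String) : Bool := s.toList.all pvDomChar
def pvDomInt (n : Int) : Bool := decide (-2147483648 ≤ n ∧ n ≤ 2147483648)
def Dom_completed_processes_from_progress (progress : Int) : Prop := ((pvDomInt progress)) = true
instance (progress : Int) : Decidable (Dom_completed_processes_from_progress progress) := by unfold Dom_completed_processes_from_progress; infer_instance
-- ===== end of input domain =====

-- B replaces A's cumulative loop-with-break by a precomputed threshold table plus a
-- hand-written binary search whose count selects a prefix of the name list (alternative).
-- int(round(float(progress or 0))) is the identity on Dom's integer inputs (exact in float), so both
-- ports compute numeric directly as the clamp max 0 (min 100 progress).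

-- ===== PORT A =====
def pvProcessFlow : List (String × Int) :=
  [("CNC Cutting", 15), ("CNC Edging", 15), ("CNC Routing", 15),
   ("Assembly", 40), ("Quality Assurance", 5), ("Packing", 10)]

-- the for-loop with break: running cumulative, stop at the first threshold exceeded
def pvLoopA (numeric : Int) : List (String × Int) → Int → List String
  | [], _ => []
  | (name, ratio) :: rest, cumulative =>
      let c := cumulative + ratio
      if numeric ≥ c then name :: pvLoopA numeric rest c else []

def completed_processes_from_progress (progress : Int) : List String :=
  let numeric := max 0 (min 100 progress)
  pvLoopA numeric pvProcessFlow 0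

-- ===== PORT B =====
def pvThresholds : List Int := [15, 30, 45, 85, 90, 100]
def pvNames : List String :=
  ["CNC Cutting", "CNC Edging", "CNC Routing", "Assembly", "Quality Assurance", "Packing"]

-- hand-written bisect_right: the while lo < hi loop of Source B (lo, hi are nonnegative
-- indices); fuel = hi - lo only makes the loop total, the computation is unchanged
def pvBisect (numeric : Int) : Nat → Nat → Nat → Nat
  | 0, lo, _ => lo
  | fuel + 1, lo, hi =>
    if lo < hi then
      let mid := (lo + hi) / 2
      if pvThresholds.getD mid 0 ≤ numeric then pvBisect numeric fuel (mid + 1) hi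
      else pvBisect numeric fuel lo mid
    else lo

def completed_processes_from_progress_alt (progress : Int) : List String :=
  let numeric := max 0 (min 100 progress)
  pvNames.take (pvBisect numeric pvThresholds.length 0 pvThresholds.length)

-- ===== PRECONDITION & SPEC =====
def Spec_completed_processes_from_progress (progress : Int) (out : List String) : Prop := out = completed_processes_from_progress_alt progress
instance (progress : Int) (out : List String) : Decidable (Spec_completed_processes_from_progress progress out) := by unfold Spec_completed_processes_from_progress; infer_instance

-- ===== CLAIM (what is proved, stated in full; the proofs are below) =====
def Claim_equal_completed_processes_from_progress : Prop := ∀ (progress : Int), Dom_completed_processes_from_progress progress → Spec_completed_processes_from_progress progress (completed_processes_from_progress progress)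

-- ===== LEMMAS AND PROOFS =====

-- both ports agree on every clamped value 0..100 (finite check)
theorem pv_key : ∀ n ∈ List.range 101,
    pvLoopA (n : Int) pvProcessFlow 0
      = pvNames.take (pvBisect (n : Int) pvThresholds.length 0 pvThresholds.length) := by decide

-- ===== VERDICT (by name: the statement is the Claim_ definition above) =====
theorem completed_processes_from_progress_spec : Claim_equal_completed_processes_from_progress := by
  intro progress _
  unfold Spec_completed_processes_from_progress
  unfold completed_processes_from_progress completed_processes_from_progress_alt
  set m : Int := max 0 (min 100 progress) with hm
  have h0 : 0 ≤ m := le_max_left _ _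
  have h1 : m ≤ 100 := by
    have := min_le_left (100 : Int) progress
    simp [hm]
  have hnat : m = ((m.toNat : Nat) : Int) := (Int.toNat_of_nonneg h0).symm
  have hmem : m.toNat ∈ List.range 101 := by
    refine List.mem_range.mpr ?_
    omega
  have := pv_key m.toNat hmem
  rw [hnat]
  simpa using this
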